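-- pv_equiv track=rewrite | github.com/chewing0/xwproject | backend/api/protocol_analyzer.py | contains_in_order
-- ===== SOURCE A (Python) =====
-- def contains_in_order(a_str, b_str):
--     a_str = a_str.replace('[',' ')  # 替换方括号
--     b_str = b_str.replace('[',' ')
--     words = b_str.split()  # 按空格分割成单词列表
--     current_pos = 0  # 标记当前查找的起始位置
--     for word in words:
--         idx = a_str.find(word, current_pos)  # 从current_pos开始查找单词
--         if idx == -1:
--             return False  # 未找到单词，直接返回False
--         current_pos = idx + len(word)  # 更新查找位置到当前单词末尾
--     return True  # 所有单词均按顺序找到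
-- ===== SOURCE B (Python) =====
-- def contains_in_order(a_str, b_str):
--     # Back-to-front scan: search the reversed haystack for each reversed word,
--     # last word first, slicing off the consumed tail after each match.
--     rev = a_str.replace('[', ' ')[::-1]
--     words = b_str.replace('[', ' ').split()
--     for w in reversed(words):
--         i = rev.find(w[::-1])
--         if i == -1:
--             return False
--         rev = rev[i + len(w):]
--     return True
-- ===== Notes on version B (the rewrite author's own statement) =====
-- stated objective: alternative
-- what changed: B scans back-to-front: it reverses the haystack, iterates the words in reverse order, finds each reversed word with a plain find on the remaining reversed string and slices off the consumed tail, instead of A's forward loop with find(word, current_pos); equivalence holds because both decide the existence of an ordered occurrence.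
import Mathlib
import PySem

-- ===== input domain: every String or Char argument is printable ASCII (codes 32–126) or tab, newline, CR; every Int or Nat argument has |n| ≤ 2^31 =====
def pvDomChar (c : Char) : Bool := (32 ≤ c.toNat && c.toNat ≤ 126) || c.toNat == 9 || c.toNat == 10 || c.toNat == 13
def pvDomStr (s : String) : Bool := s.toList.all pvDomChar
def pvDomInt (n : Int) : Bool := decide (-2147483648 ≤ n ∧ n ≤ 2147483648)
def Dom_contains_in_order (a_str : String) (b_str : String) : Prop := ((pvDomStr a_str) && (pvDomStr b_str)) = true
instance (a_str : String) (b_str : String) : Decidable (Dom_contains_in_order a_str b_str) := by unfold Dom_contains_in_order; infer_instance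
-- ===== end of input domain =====

-- B replaces A's forward find(word, current_pos) loop by a back-to-front scan of the
-- reversed haystack (an alternative traversal, same cost; return values proved equal).

-- ===== PORT A =====
-- for word in words: idx = a_str.find(word, current_pos); …; current_pos = idx + len(word)
def ciLoopA (a : List Char) : List (List Char) → Int → Bool
  | [], _ => true
  | w :: ws, pos =>
      let idx := PySem.Chars.findFrom a w pos none
      if idx = -1 then false else ciLoopA a ws (idx + (w.length : Int))

def contains_in_order (a_str : String) (b_str : String) : Bool :=
  let a := PySem.Chars.replace a_str.toList ['['] [' ']
  let b := PySem.Chars.replace b_str.toList ['['] [' ']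
  let words := PySem.Chars.split₀ b
  ciLoopA a words 0

-- ===== PORT B =====
-- for w in reversed(words): i = rev.find(w[::-1]); …; rev = rev[i+len(w):]
def ciLoopB : List (List Char) → List Char → Bool
  | [], _ => true
  | w :: ws, rev =>
      let wr := (PySem.List.slice? w none none (-1)).getD []   -- w[::-1]
      let i := PySem.Chars.find rev wr
      if i = -1 then false
      else ciLoopB ws (PySem.List.slice rev (some (i + (w.length : Int))) none)  -- rev[i+len(w):]

def contains_in_order_alt (a_str : String) (b_str : String) : Bool :=
  let a := PySem.Chars.replace a_str.toList ['['] [' ']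
  let rev := (PySem.List.slice? a none none (-1)).getD []      -- a[::-1]
  let words := PySem.Chars.split₀ (PySem.Chars.replace b_str.toList ['['] [' '])
  ciLoopB words.reverse rev

-- ===== PRECONDITION & SPEC =====
def Spec_contains_in_order (a_str : String) (b_str : String) (out : Bool) : Prop := out = contains_in_order_alt a_str b_str
instance (a_str : String) (b_str : String) (out : Bool) : Decidable (Spec_contains_in_order a_str b_str out) := by unfold Spec_contains_in_order; infer_instance

-- ===== CLAIM (what is proved, stated in full; the proofs are below) =====
def Claim_equal_contains_in_order : Prop := ∀ (a_str : String) (b_str : String), Dom_contains_in_order a_str b_str → Spec_contains_in_order a_str b_str (contains_in_order a_str b_str)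

-- ===== LEMMAS AND PROOFS =====

-- ordered occurrence of the words in s
def Emb : List (List Char) → List Char → Prop
  | [], _ => True
  | w :: ws, s => ∃ p q, s = p ++ w ++ q ∧ Emb ws q

theorem emb_of_drop {ws : List (List Char)} {t : List Char} {m : Nat}
    (h : Emb ws (t.drop m)) : Emb ws t := by
  cases ws with
  | nil => trivial
  | cons w ws =>
    obtain ⟨p, q, hpq, hq⟩ := h
    refine ⟨t.take m ++ p, q, ?_, hq⟩
    conv_lhs => rw [← List.take_append_drop m t, hpq]
    simp [List.append_assoc]

theorem emb_append_word {us : List (List Char)} {t : List Char} (v r : List Char)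
    (h : Emb us t) : Emb (us ++ [v]) (t ++ v ++ r) := by
  induction us generalizing t with
  | nil => exact ⟨t, r, by simp, trivial⟩
  | cons u us ih =>
    obtain ⟨p, q, hpq, hq⟩ := h
    exact ⟨p, q ++ v ++ r, by simp [hpq], ih hq⟩

theorem emb_rev {ws : List (List Char)} {s : List Char} (h : Emb ws s) :
    Emb (ws.reverse.map List.reverse) s.reverse := by
  induction ws generalizing s with
  | nil => trivial
  | cons w ws ih =>
    obtain ⟨p, q, hpq, hq⟩ := h
    have := emb_append_word w.reverse p.reverse (ih hq)
    simpa [hpq] using this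

theorem emb_reverse_iff (ws : List (List Char)) (s : List Char) :
    Emb (ws.reverse.map List.reverse) s.reverse ↔ Emb ws s := by
  constructor
  · intro h
    have := emb_rev h
    simpa [List.map_reverse, Function.comp] using this
  · exact emb_rev

-- the exchange step: the first occurrence of w can always be used
theorem emb_cons_iff {w : List Char} (ws : List (List Char)) (s : List Char) :
    Emb (w :: ws) s ↔
      0 ≤ PySem.Chars.find s w ∧ Emb ws (s.drop ((PySem.Chars.find s w).toNat + w.length)) := by
  constructor
  · rintro ⟨p, q, hpq, hq⟩
    have hinf : w <:+: s := ⟨p, q, by simpa [List.append_assoc] using hpq.symm⟩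
    have hfind : 0 ≤ PySem.Chars.find s w := (PySem.Chars.find_nonneg_iff s w).mpr hinf
    obtain ⟨hpre, hmin⟩ := PySem.Chars.find_spec (s := s) (sub := w) hfind
    -- first occurrence index i ≤ p.length
    have hplen : w <+: s.drop p.length := ⟨q, by simp [hpq]⟩
    have hle : (PySem.Chars.find s w).toNat ≤ p.length := by
      by_contra hlt
      exact hmin p.length (by omega) hplen
    refine ⟨hfind, emb_of_drop (m := p.length - (PySem.Chars.find s w).toNat) ?_⟩
    have hkey : (s.drop ((PySem.Chars.find s w).toNat + w.length)).drop
        (p.length - (PySem.Chars.find s w).toNat) = q := by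
      rw [List.drop_drop]
      have he : (PySem.Chars.find s w).toNat + w.length + (p.length - (PySem.Chars.find s w).toNat)
          = (p ++ w).length := by simp; omega
      rw [he, hpq, List.drop_left]
    rwa [hkey]
  · rintro ⟨hfind, hq⟩
    obtain ⟨hpre, -⟩ := PySem.Chars.find_spec (s := s) (sub := w) hfind
    obtain ⟨t, ht⟩ := hpre
    refine ⟨s.take (PySem.Chars.find s w).toNat, t, ?_, ?_⟩
    · rw [List.append_assoc, ht, List.take_append_drop]
    · have hts : t = s.drop ((PySem.Chars.find s w).toNat + w.length) := by
        have h2 := congrArg (List.drop w.length) ht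
        rw [List.drop_drop, List.drop_left' rfl] at h2
        exact h2
      rwa [← hts] at hq

theorem emb_cons_head_infix {w : List Char} {ws : List (List Char)} {s : List Char}
    (h : Emb (w :: ws) s) : w <:+: s := by
  obtain ⟨p, q, hpq, -⟩ := h
  exact ⟨p, q, by simpa [List.append_assoc] using hpq.symm⟩

-- find fits inside the string
theorem find_fit {s w : List Char} (h : 0 ≤ PySem.Chars.find s w) :
    (PySem.Chars.find s w).toNat + w.length ≤ s.length := by
  obtain ⟨hpre, -⟩ := PySem.Chars.find_spec (s := s) (sub := w) h
  have h1 := hpre.length_le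
  have h2 : PySem.Chars.find s w ≤ (s.length : Int) := PySem.Chars.find_le_length s w
  simp [List.length_drop] at h1
  omega

-- loop A computes Emb on the suffix from current_pos
theorem ciLoopA_iff (a : List Char) (ws : List (List Char)) :
    ∀ k : Nat, k ≤ a.length → (ciLoopA a ws (k : Int) = true ↔ Emb ws (a.drop k)) := by
  induction ws with
  | nil => intro k hk; simp [ciLoopA, Emb]
  | cons w ws ih =>
    intro k hk
    rw [ciLoopA, PySem.Chars.findFrom_natCast a w k hk]
    by_cases hf : PySem.Chars.find (a.drop k) w = -1
    · simp only [hf, reduceIte]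
      constructor
      · intro h; cases h
      · intro h
        exact absurd (emb_cons_head_infix h) (PySem.Chars.find_eq_neg_one_iff _ _ |>.mp hf)
    · have hge : 0 ≤ PySem.Chars.find (a.drop k) w := by
        have := PySem.Chars.neg_one_le_find (a.drop k) w; omega
      have hne : (k : Int) + PySem.Chars.find (a.drop k) w ≠ -1 := by omega
      simp only [if_neg hf, if_neg hne]
      have hfit := find_fit (s := a.drop k) (w := w) hge
      simp [List.length_drop] at hfit
      have harg : (k : Int) + PySem.Chars.find (a.drop k) w + (w.length : Int)
          = ((k + (PySem.Chars.find (a.drop k) w).toNat + w.length : Nat) : Int) := by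
        push_cast; omega
      rw [harg, ih _ (by omega), emb_cons_iff]
      have hdd : a.drop (k + (PySem.Chars.find (a.drop k) w).toNat + w.length)
          = (a.drop k).drop ((PySem.Chars.find (a.drop k) w).toNat + w.length) := by
        rw [List.drop_drop]; ring_nf
      rw [hdd]
      constructor
      · intro h; exact ⟨hge, h⟩
      · intro h; exact h.2

-- loop B computes Emb of the reversed words on the remaining reversed string
theorem ciLoopB_iff (ws : List (List Char)) :
    ∀ s : List Char, (ciLoopB ws s = true ↔ Emb (ws.map List.reverse) s) := by
  induction ws with
  | nil => intro s; simp [ciLoopB, Emb]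
  | cons w ws ih =>
    intro s
    rw [ciLoopB]
    simp only [PySem.List.slice?_none_none_neg_one, Option.getD_some]
    by_cases hf : PySem.Chars.find s w.reverse = -1
    · simp only [if_pos hf]
      constructor
      · intro h; cases h
      · intro h
        exact absurd (emb_cons_head_infix h) (PySem.Chars.find_eq_neg_one_iff _ _ |>.mp hf)
    · have hge : 0 ≤ PySem.Chars.find s w.reverse := by
        have := PySem.Chars.neg_one_le_find s w.reverse; omega
      simp only [if_neg hf]
      have hs : PySem.List.slice s (some (PySem.Chars.find s w.reverse + (w.length : Int))) none
          = s.drop (PySem.Chars.find s w.reverse + (w.length : Int)).toNat :=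
        PySem.List.slice_from s (by omega)
      rw [hs, ih, List.map_cons, emb_cons_iff]
      have harg : (PySem.Chars.find s w.reverse + (w.length : Int)).toNat
          = (PySem.Chars.find s w.reverse).toNat + w.reverse.length := by
        simp [List.length_reverse]; omega
      rw [harg]
      constructor
      · intro h; exact ⟨hge, h⟩
      · intro h; exact h.2

-- ===== VERDICT (by name: the statement is the Claim_ definition above) =====
theorem contains_in_order_spec : Claim_equal_contains_in_order := by
  intro a_str b_str _
  unfold Spec_contains_in_order contains_in_order contains_in_order_alt
  rw [Bool.eq_iff_iff]
  have hA := ciLoopA_iff (PySem.Chars.replace a_str.toList ['['] [' '])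
      (PySem.Chars.split₀ (PySem.Chars.replace b_str.toList ['['] [' '])) 0 (by omega)
  have hB := ciLoopB_iff
      (PySem.Chars.split₀ (PySem.Chars.replace b_str.toList ['['] [' '])).reverse
      (PySem.Chars.replace a_str.toList ['['] [' ']).reverse
  simp only [PySem.List.slice?_none_none_neg_one, Option.getD_some]
  rw [Int.natCast_zero] at hA
  simp only [List.drop_zero] at hA
  rw [hA, hB, emb_reverse_iff]
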